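-- pv_equiv track=rewrite | github.com/Saipreetham0/dress_code | scrap files/live_uniform_loop.py | is_uniform
-- ===== SOURCE A (Python) =====
-- REQUIRED = {
--     'shirt': ['shirt', 'gray-shirt', 'shirt-gray'],
--     'inshirt': ['inshirt', 'tucked', 'shirt-tucked', 'tucked-shirt'],
--     'pants': ['pants', 'black-pants', 'pants-black'],
--     'shoes': ['shoes', 'shoe'],
--     'id-card': ['id-card', 'id_card', 'idcard']
-- }
--
-- def is_uniform(labels: set) -> bool:
--     return (
--         any(l in REQUIRED['shirt'] for l in labels)
--         and any(l in REQUIRED['inshirt'] for l in labels)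
--         and any(l in REQUIRED['pants'] for l in labels)
--         and any(l in REQUIRED['shoes'] for l in labels)
--         and any(l in REQUIRED['id-card'] for l in labels)
--     )
-- ===== SOURCE B (Python) =====
-- REQUIRED = {
--     'shirt': ['shirt', 'gray-shirt', 'shirt-gray'],
--     'inshirt': ['inshirt', 'tucked', 'shirt-tucked', 'tucked-shirt'],
--     'pants': ['pants', 'black-pants', 'pants-black'],
--     'shoes': ['shoes', 'shoe'],
--     'id-card': ['id-card', 'id_card', 'idcard']
-- }
--
-- # reverse lookup: label string -> its category key (built once; categories are disjoint)
-- REV = {v: k for k, vs in REQUIRED.items() for v in vs}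
--
-- def is_uniform(labels: set) -> bool:
--     satisfied = set()
--     for l in labels:
--         k = REV.get(l)
--         if k is not None:
--             satisfied.add(k)
--     return satisfied >= set(REQUIRED)
-- ===== Notes on version B (the rewrite author's own statement) =====
-- stated objective: alternative
-- what changed: Replaces five separate any()-scans over the labels with a single pass that maps each label through a precomputed reverse lookup dict into a set of satisfied category keys, then one superset check.
import Mathlib
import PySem

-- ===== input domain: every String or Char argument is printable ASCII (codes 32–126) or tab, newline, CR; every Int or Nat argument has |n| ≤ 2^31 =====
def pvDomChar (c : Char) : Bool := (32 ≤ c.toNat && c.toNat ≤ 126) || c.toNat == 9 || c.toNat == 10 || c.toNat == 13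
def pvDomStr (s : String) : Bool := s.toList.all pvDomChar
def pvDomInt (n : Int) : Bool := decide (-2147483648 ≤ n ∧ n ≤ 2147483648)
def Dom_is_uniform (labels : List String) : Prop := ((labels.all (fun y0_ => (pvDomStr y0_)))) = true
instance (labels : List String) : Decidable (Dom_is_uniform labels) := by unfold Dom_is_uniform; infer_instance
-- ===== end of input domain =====

-- B replaces A's five any()-scans by one pass through a reverse-lookup dict into a set of
-- satisfied category keys, finished by a single superset check (alternative decomposition).


-- ===== PORT A =====
-- REQUIRED['shirt'] … REQUIRED['id-card'] as the literal lists A checks membership in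
def pvShirt : List String := ["shirt", "gray-shirt", "shirt-gray"]
def pvInshirt : List String := ["inshirt", "tucked", "shirt-tucked", "tucked-shirt"]
def pvPants : List String := ["pants", "black-pants", "pants-black"]
def pvShoes : List String := ["shoes", "shoe"]
def pvIdcard : List String := ["id-card", "id_card", "idcard"]

def is_uniform (labels : List String) : Bool :=
  (labels.any (fun l => pvShirt.contains l))
  && (labels.any (fun l => pvInshirt.contains l))
  && (labels.any (fun l => pvPants.contains l))
  && (labels.any (fun l => pvShoes.contains l))
  && (labels.any (fun l => pvIdcard.contains l))

-- ===== PORT B =====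
-- REV = {v: k for k, vs in REQUIRED.items() for v in vs}
def pvRev : PySem.Dict String String := PySem.Dict.ofList
  [("shirt","shirt"),("gray-shirt","shirt"),("shirt-gray","shirt"),
   ("inshirt","inshirt"),("tucked","inshirt"),("shirt-tucked","inshirt"),("tucked-shirt","inshirt"),
   ("pants","pants"),("black-pants","pants"),("pants-black","pants"),
   ("shoes","shoes"),("shoe","shoes"),
   ("id-card","id-card"),("id_card","id-card"),("idcard","id-card")]

-- set(REQUIRED): the category keys
def pvKeys : List String := ["shirt", "inshirt", "pants", "shoes", "id-card"]

-- loop body: k = REV.get(l); if k is not None: satisfied.add(k)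
def pvStep (s : PySem.Set String) (l : String) : PySem.Set String :=
  match pvRev.get? l with
  | some k => PySem.Set.add s k
  | none => s

def is_uniform_alt (labels : List String) : Bool :=
  let satisfied := labels.foldl pvStep PySem.Set.empty
  PySem.Set.issuperset satisfied (PySem.Set.ofList pvKeys)

-- ===== PRECONDITION & SPEC =====
def Spec_is_uniform (labels : List String) (out : Bool) : Prop := out = is_uniform_alt labels
instance (labels : List String) (out : Bool) : Decidable (Spec_is_uniform labels out) := by unfold Spec_is_uniform; infer_instance

-- ===== CLAIM (what is proved, stated in full; the proofs are below) =====
def Claim_equal_is_uniform : Prop := ∀ (labels : List String), Dom_is_uniform labels → Spec_is_uniform labels (is_uniform labels)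

-- ===== LEMMAS AND PROOFS =====

-- the reverse map, evaluated to a literal dict (all keys distinct, so insertion just appends)
theorem pvRev_eq : pvRev = PySem.Dict.mk
  [("shirt","shirt"),("gray-shirt","shirt"),("shirt-gray","shirt"),
   ("inshirt","inshirt"),("tucked","inshirt"),("shirt-tucked","inshirt"),("tucked-shirt","inshirt"),
   ("pants","pants"),("black-pants","pants"),("pants-black","pants"),
   ("shoes","shoes"),("shoe","shoes"),
   ("id-card","id-card"),("id_card","id-card"),("idcard","id-card")] := by decide

-- membership in the fold's accumulated set
theorem mem_foldl_pvStep (labels : List String) (s : PySem.Set String) (k : String) :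
    k ∈ labels.foldl pvStep s ↔ k ∈ s ∨ ∃ l ∈ labels, pvRev.get? l = some k := by
  induction labels generalizing s with
  | nil => simp
  | cons x xs ih =>
    simp only [List.foldl_cons, ih, List.mem_cons]
    constructor
    · rintro (hmem | ⟨l, hl, hg⟩)
      · unfold pvStep at hmem
        cases h : pvRev.get? x with
        | none => rw [h] at hmem; exact Or.inl hmem
        | some k' =>
          rw [h] at hmem
          rcases (PySem.Set.mem_add _ _ _).mp hmem with h2 | h2
          · exact Or.inl h2
          · exact Or.inr ⟨x, Or.inl rfl, by rw [h, h2]⟩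
      · exact Or.inr ⟨l, Or.inr hl, hg⟩
    · rintro (hmem | ⟨l, (rfl | hl), hg⟩)
      · left; unfold pvStep
        cases h : pvRev.get? x with
        | none => exact hmem
        | some k' => exact (PySem.Set.mem_add _ _ _).mpr (Or.inl hmem)
      · left; unfold pvStep; rw [hg]; exact (PySem.Set.mem_add _ _ _).mpr (Or.inr rfl)
      · exact Or.inr ⟨l, hl, hg⟩

-- the reverse map hits category key k exactly on that category's label list
theorem rev_shirt (l : String) : pvRev.get? l = some "shirt" ↔ l ∈ pvShirt := by
  rw [pvRev_eq, PySem.Dict.get?_eq_some_iff_mem_items _ _ _ (by decide)]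
  simp [pvShirt, Prod.ext_iff]

theorem rev_inshirt (l : String) : pvRev.get? l = some "inshirt" ↔ l ∈ pvInshirt := by
  rw [pvRev_eq, PySem.Dict.get?_eq_some_iff_mem_items _ _ _ (by decide)]
  simp [pvInshirt, Prod.ext_iff]

theorem rev_pants (l : String) : pvRev.get? l = some "pants" ↔ l ∈ pvPants := by
  rw [pvRev_eq, PySem.Dict.get?_eq_some_iff_mem_items _ _ _ (by decide)]
  simp [pvPants, Prod.ext_iff]

theorem rev_shoes (l : String) : pvRev.get? l = some "shoes" ↔ l ∈ pvShoes := by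
  rw [pvRev_eq, PySem.Dict.get?_eq_some_iff_mem_items _ _ _ (by decide)]
  simp [pvShoes, Prod.ext_iff]

theorem rev_idcard (l : String) : pvRev.get? l = some "id-card" ↔ l ∈ pvIdcard := by
  rw [pvRev_eq, PySem.Dict.get?_eq_some_iff_mem_items _ _ _ (by decide)]
  simp [pvIdcard, Prod.ext_iff]

-- ===== VERDICT (by name: the statement is the Claim_ definition above) =====
theorem is_uniform_spec : Claim_equal_is_uniform := by
  intro labels _
  unfold Spec_is_uniform
  rw [Bool.eq_iff_iff]
  simp only [is_uniform, is_uniform_alt, Bool.and_eq_true, List.any_eq_true,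
    PySem.Set.issuperset_iff, pvKeys, List.contains_eq_mem, decide_eq_true_eq,
    mem_foldl_pvStep, PySem.Set.empty]
  simp only [PySem.Set.mem_ofList, List.mem_cons, List.not_mem_nil, or_false, forall_eq_or_imp,
    forall_eq, rev_shirt, rev_inshirt, rev_pants, rev_shoes, rev_idcard]
  tauto
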